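-- pv_equiv track=rewrite | github.com/EBlundellSparta/Data21Notes | examples_and_challenges/daily_challenge.py | combin_nums
-- ===== SOURCE A (Python) =====
-- def combin_nums(number: str):
--     all_combs = []
--     for index, digit in enumerate(number):
--         if index == 0:
--             all_combs.append(digit + number[index + 1:])
--         else:
--             all_combs.append(digit + number[index + 1:] + number[:index])
--     return all_combs
-- ===== SOURCE B (Python) =====
-- def combin_nums(number: str):
--     n = len(number)
--     doubled = number + number
--     return [doubled[i:i + n] for i in range(n)]
-- ===== Notes on version B (the rewrite author's own statement) =====
-- stated objective: idiomatic
-- what changed: B precomputes one doubled string and slides a fixed-width window over it, replacing A's per-index enumerate loop that concatenates a character, a suffix slice and a prefix slice.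
import Mathlib
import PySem

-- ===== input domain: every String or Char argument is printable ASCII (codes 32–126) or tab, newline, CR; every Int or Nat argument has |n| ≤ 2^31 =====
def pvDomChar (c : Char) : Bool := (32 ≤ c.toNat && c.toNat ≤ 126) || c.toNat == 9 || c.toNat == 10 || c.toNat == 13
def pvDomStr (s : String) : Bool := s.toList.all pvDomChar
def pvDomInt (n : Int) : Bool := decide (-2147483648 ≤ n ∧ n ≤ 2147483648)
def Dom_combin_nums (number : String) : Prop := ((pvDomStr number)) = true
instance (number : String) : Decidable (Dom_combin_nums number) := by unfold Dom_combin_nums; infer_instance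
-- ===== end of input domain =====

-- B replaces A's enumerate loop (char + suffix slice + prefix slice per index) by one doubled
-- string and a sliding fixed-width window slice; same values, more idiomatic.


-- ===== PORT A =====
-- for index, digit in enumerate(number): append digit + number[index+1:] (+ number[:index] if index ≠ 0)
def combin_nums (number : String) : List String :=
  (PySem.List.enumerate number.toList 0).foldl
    (fun all_combs p =>
      let index := p.1
      let digit := p.2
      if index == 0 then
        all_combs ++ [String.ofList ([digit] ++ PySem.List.slice number.toList (some (index + 1)) none)]
      else
        all_combs ++ [String.ofList ([digit] ++ PySem.List.slice number.toList (some (index + 1)) none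
                        ++ PySem.List.slice number.toList none (some index))])
    []

-- ===== PORT B =====
-- n = len(number); doubled = number + number; [doubled[i:i+n] for i in range(n)]
def combin_nums_alt (number : String) : List String :=
  let n : Int := (number.toList.length : Int)
  let doubled := number.toList ++ number.toList
  (PySem.List.pyRange 0 n 1).map
    (fun i => String.ofList (PySem.List.slice doubled (some i) (some (i + n))))

-- ===== PRECONDITION & SPEC =====
def Spec_combin_nums (number : String) (out : List String) : Prop := out = combin_nums_alt number
instance (number : String) (out : List String) : Decidable (Spec_combin_nums number out) := by unfold Spec_combin_nums; infer_instance

-- ===== CLAIM (what is proved, stated in full; the proofs are below) =====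
def Claim_equal_combin_nums : Prop := ∀ (number : String), Dom_combin_nums number → Spec_combin_nums number (combin_nums number)

-- ===== LEMMAS AND PROOFS =====

theorem foldl_snoc_if {α β : Type} (c : β → Bool) (f g : β → α) (l : List β) (acc : List α) :
    l.foldl (fun a p => if c p then a ++ [f p] else a ++ [g p]) acc
      = acc ++ l.map (fun p => if c p then f p else g p) := by
  induction l generalizing acc with
  | nil => simp
  | cons x xs ih => simp only [List.foldl, List.map, ih]; split <;> simp

-- rotation identity: window of the doubled list = suffix ++ prefix
theorem window_eq_rot {α : Type} (s : List α) (k : Nat) (hk : k ≤ s.length) :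
    ((s ++ s).drop k).take s.length = s.drop k ++ s.take k := by
  rw [List.drop_append_of_le_length hk]
  rw [List.take_append]
  congr 1
  · exact List.take_of_length_le (by simp)
  · congr 1; simp; omega

theorem combin_nums_spec : Claim_equal_combin_nums := by
  intro number _
  unfold Spec_combin_nums
  simp only [combin_nums, combin_nums_alt]
  set s := number.toList with hs
  rw [PySem.List.enumerate_eq_map_pyRange (d := 'A'), foldl_snoc_if, List.nil_append,
      PySem.List.len_eq, List.map_map]
  apply List.map_congr_left
  intro i hi
  rw [PySem.List.mem_pyRange_one] at hi
  obtain ⟨k, rfl⟩ : ∃ k : Nat, i = (k : Int) := ⟨i.toNat, (Int.toNat_of_nonneg hi.1).symm⟩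
  have hk : k < s.length := by exact_mod_cast hi.2
  simp only [Function.comp]
  rw [PySem.List.slice_natCast_add, window_eq_rot s k (Nat.le_of_lt hk),
      List.drop_eq_getElem_cons hk]
  by_cases h0 : k = 0
  · subst h0
    norm_num
    rw [PySem.List.slice_from_one, show (0:Int) = ((0:Nat):Int) from rfl,
        PySem.List.pyGetD_natCast]
    simp [hk]
  · have hne : ((k : Int) == 0) = false := by
      simp only [beq_eq_false_iff_ne, ne_eq, Nat.cast_eq_zero]; exact h0
    simp only [hne, Bool.false_eq_true, if_false]
    congr 1
    rw [show ((k : Int) + 1) = (((k + 1 : Nat)) : Int) by push_cast; ring,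
        PySem.List.slice_from_natCast, PySem.List.slice_to_natCast]
    simp [PySem.List.pyGetD_natCast, hk]
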